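-- pv_equiv track=rewrite | github.com/dundunmao/LeetCode2019 | 737. Sentence Similarity II.py | bfs
-- ===== SOURCE A (Python) =====
-- import collections
--
-- def bfs(word1, word2, adjacency):
--     visited = set()
--     q = collections.deque()
--     q.append(word1)
--     visited.add(word1)
--     while len(q) > 0:
--         word = q.popleft()
--         if word2 == word:
--             return True
--         if word in adjacency:
--             for w in adjacency[word]:
--                 if w not in visited:
--                     q.append(w)
--                     visited.add(w)
--     return False
-- ===== SOURCE B (Python) =====
-- def bfs(word1, word2, adjacency):
--     # round-based saturation of the reachable set instead of an explicit FIFO queue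
--     reach = {word1}
--     rounds = 1 + sum(len(vs) for vs in adjacency.values())
--     for _ in range(rounds):
--         before = len(reach)
--         for w in list(reach):
--             if w in adjacency:
--                 for v in adjacency[w]:
--                     reach.add(v)
--         if len(reach) == before:
--             break
--     return word2 in reach
-- ===== Notes on version B (the rewrite author's own statement) =====
-- stated objective: alternative
-- what changed: Replaces A's FIFO-queue BFS with round-based saturation: repeatedly add every neighbour of every already-reached node until a pass adds nothing (within a proven-sufficient bound of passes), then test membership of word2.
import Mathlib
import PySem

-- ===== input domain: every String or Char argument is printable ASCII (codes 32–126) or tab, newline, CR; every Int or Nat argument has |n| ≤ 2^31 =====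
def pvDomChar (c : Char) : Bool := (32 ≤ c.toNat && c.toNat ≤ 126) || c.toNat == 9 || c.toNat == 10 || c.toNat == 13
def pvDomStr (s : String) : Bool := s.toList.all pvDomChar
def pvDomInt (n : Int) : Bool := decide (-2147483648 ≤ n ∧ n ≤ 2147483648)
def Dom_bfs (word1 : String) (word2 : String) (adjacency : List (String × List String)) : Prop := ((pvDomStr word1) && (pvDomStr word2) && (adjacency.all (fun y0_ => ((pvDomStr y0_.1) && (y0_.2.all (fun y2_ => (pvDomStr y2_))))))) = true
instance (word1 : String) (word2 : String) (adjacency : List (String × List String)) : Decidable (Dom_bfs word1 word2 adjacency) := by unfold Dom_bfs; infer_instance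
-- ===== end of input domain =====

-- B replaces A's FIFO queue by round-based saturation of the reachable set (repeat: add all
-- neighbours of known nodes, stop when a pass adds nothing); same return value, no speed claim.

-- ===== PORT A =====
-- dict lookup (first match) for 'word in adjacency' / 'adjacency[word]'
def pvAdjGet (adjacency : List (String × List String)) (w : String) : Option (List String) :=
  (adjacency.find? (fun p => p.1 == w)).map (fun p => p.2)

-- body of A's inner 'for w in adjacency[word]: if w not in visited: q.append(w); visited.add(w)'
def pvStepPair (p : List String × PySem.Set String) (w : String) : List String × PySem.Set String :=
  if PySem.Set.contains p.2 w then p else (p.1 ++ [w], PySem.Set.add p.2 w)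

-- A's while-loop; the fuel is only a totality guard (the proofs show it never runs out)
def bfsAux (word2 : String) (adjacency : List (String × List String)) :
    Nat → List String → PySem.Set String → Bool
  | 0, _, _ => false
  | fuel+1, q, visited =>
    match q with
    | [] => false
    | word :: rest =>
      if word2 == word then true
      else
        match pvAdjGet adjacency word with
        | some ns =>
          let st := ns.foldl pvStepPair (rest, visited)
          bfsAux word2 adjacency fuel st.1 st.2
        | none => bfsAux word2 adjacency fuel rest visited

-- every node that can ever enter the queue (used only to size the fuel)
def pvUniv (word1 : String) (adjacency : List (String × List String)) : List String :=
  word1 :: adjacency.flatMap (fun p => p.2)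

def bfs (word1 : String) (word2 : String) (adjacency : List (String × List String)) : Bool :=
  bfsAux word2 adjacency (2 * (pvUniv word1 adjacency).length + 1)
    [word1] (PySem.Set.add PySem.Set.empty word1)

-- ===== PORT B =====
-- one snapshot element of B's pass: 'if w in adjacency: for v in adjacency[w]: reach.add(v)'
def pvPassStep (adjacency : List (String × List String)) (acc : PySem.Set String) (w : String) :
    PySem.Set String :=
  match pvAdjGet adjacency w with
  | some ns => ns.foldl (fun a v => PySem.Set.add a v) acc
  | none => acc

-- one pass: 'for w in list(reach): …'
def pvPass (adjacency : List (String × List String)) (reach : PySem.Set String) : PySem.Set String :=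
  reach.foldl (pvPassStep adjacency) reach

-- 'for _ in range(rounds): …; if len(reach) == before: break'
def pvLoop (adjacency : List (String × List String)) : Nat → PySem.Set String → PySem.Set String
  | 0, r => r
  | n+1, r =>
    let r' := pvPass adjacency r
    if r'.length = r.length then r' else pvLoop adjacency n r'

def bfs_alt (word1 : String) (word2 : String) (adjacency : List (String × List String)) : Bool :=
  PySem.Set.contains
    (pvLoop adjacency (1 + (adjacency.map (fun p => p.2.length)).sum)
      (PySem.Set.add PySem.Set.empty word1))
    word2

-- ===== PRECONDITION & SPEC =====
def Spec_bfs (word1 : String) (word2 : String) (adjacency : List (String × List String)) (out : Bool) : Prop := out = bfs_alt word1 word2 adjacency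
instance (word1 : String) (word2 : String) (adjacency : List (String × List String)) (out : Bool) : Decidable (Spec_bfs word1 word2 adjacency out) := by unfold Spec_bfs; infer_instance

-- ===== CLAIM (what is proved, stated in full; the proofs are below) =====
def Claim_equal_bfs : Prop := ∀ (word1 : String) (word2 : String) (adjacency : List (String × List String)), Dom_bfs word1 word2 adjacency → Spec_bfs word1 word2 adjacency (bfs word1 word2 adjacency)

-- ===== LEMMAS AND PROOFS =====

-- neighbour list of a node (the empty list off the dict's keys)
def pvNb (adjacency : List (String × List String)) (w : String) : List String :=
  (pvAdjGet adjacency w).getD []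

-- reachability in the directed graph, the common meaning of both programs
inductive pvReach (adjacency : List (String × List String)) (word1 : String) : String → Prop where
  | base : pvReach adjacency word1 word1
  | step {u v : String} : pvReach adjacency word1 u → v ∈ pvNb adjacency u →
      pvReach adjacency word1 v

theorem pvNb_subset_univ (adjacency : List (String × List String)) (word1 v u : String)
    (h : u ∈ pvNb adjacency v) : u ∈ pvUniv word1 adjacency := by
  unfold pvNb pvAdjGet at h
  cases hf : adjacency.find? (fun p => p.1 == v) with
  | none => simp [hf] at h
  | some p =>
    have hp : p ∈ adjacency := List.mem_of_find?_eq_some hf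
    simp [hf] at h
    exact List.mem_cons_of_mem _ (List.mem_flatMap.mpr ⟨p, hp, h⟩)

theorem pvReach_subset (adjacency : List (String × List String)) (word1 : String)
    (V : List String) (h1 : word1 ∈ V)
    (hcl : ∀ v ∈ V, ∀ u ∈ pvNb adjacency v, u ∈ V) :
    ∀ v, pvReach adjacency word1 v → v ∈ V := by
  intro v h
  induction h with
  | base => exact h1
  | step hu hnb ih => exact hcl _ ih _ hnb

theorem pvStepPair_mem {V : PySem.Set String} {w : String} (h : w ∈ V) (q : List String) :
    pvStepPair (q, V) w = (q, V) := by
  simp [pvStepPair, h]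

theorem pvStepPair_not_mem {V : PySem.Set String} {w : String} (h : ¬ w ∈ V) (q : List String) :
    pvStepPair (q, V) w = (q ++ [w], V ++ [w]) := by
  unfold pvStepPair
  rw [PySem.Set.add_of_not_mem h, if_neg (by simp [h])]

theorem pvFoldA_subV (ns : List String) : ∀ (q V : List String), ∀ x ∈ V,
    x ∈ (List.foldl pvStepPair (q, V) ns).2 := by
  induction ns with
  | nil => intro q V x hx; simpa using hx
  | cons w ws ih =>
    intro q V x hx
    by_cases hw : w ∈ V
    · simpa [List.foldl, pvStepPair_mem hw] using ih q V x hx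
    · simpa [List.foldl, pvStepPair_not_mem hw] using
        ih (q ++ [w]) (V ++ [w]) x (List.mem_append_left _ hx)

theorem pvFoldA_subNs (ns : List String) : ∀ (q V : List String), ∀ x ∈ ns,
    x ∈ (List.foldl pvStepPair (q, V) ns).2 := by
  induction ns with
  | nil => intro q V x hx; simp at hx
  | cons w ws ih =>
    intro q V x hx
    rcases List.mem_cons.mp hx with hx | hx
    · subst hx
      by_cases hw : x ∈ V
      · simpa [List.foldl, pvStepPair_mem hw] using pvFoldA_subV ws q V x hw
      · simpa [List.foldl, pvStepPair_not_mem hw] using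
          pvFoldA_subV ws (q ++ [x]) (V ++ [x]) x (by simp)
    · by_cases hw : w ∈ V
      · simpa [List.foldl, pvStepPair_mem hw] using ih q V x hx
      · simpa [List.foldl, pvStepPair_not_mem hw] using ih (q ++ [w]) (V ++ [w]) x hx

theorem pvFoldA_memV (ns : List String) : ∀ (q V : List String), ∀ x,
    x ∈ (List.foldl pvStepPair (q, V) ns).2 → x ∈ V ∨ x ∈ ns := by
  induction ns with
  | nil => intro q V x hx; left; simpa using hx
  | cons w ws ih =>
    intro q V x hx
    by_cases hw : w ∈ V
    · rw [List.foldl, pvStepPair_mem hw] at hx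
      rcases ih q V x hx with h | h
      · exact Or.inl h
      · exact Or.inr (List.mem_cons_of_mem _ h)
    · rw [List.foldl, pvStepPair_not_mem hw] at hx
      rcases ih (q ++ [w]) (V ++ [w]) x hx with h | h
      · rcases List.mem_append.mp h with h | h
        · exact Or.inl h
        · simp at h; subst h; exact Or.inr (List.mem_cons_self ..)
      · exact Or.inr (List.mem_cons_of_mem _ h)

theorem pvFoldA_subQ (ns : List String) : ∀ (q V : List String), ∀ x ∈ q,
    x ∈ (List.foldl pvStepPair (q, V) ns).1 := by
  induction ns with
  | nil => intro q V x hx; simpa using hx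
  | cons w ws ih =>
    intro q V x hx
    by_cases hw : w ∈ V
    · simpa [List.foldl, pvStepPair_mem hw] using ih q V x hx
    · simpa [List.foldl, pvStepPair_not_mem hw] using
        ih (q ++ [w]) (V ++ [w]) x (List.mem_append_left _ hx)

theorem pvFoldA_memQ (ns : List String) : ∀ (q V : List String), ∀ x,
    x ∈ (List.foldl pvStepPair (q, V) ns).1 →
    x ∈ q ∨ x ∈ (List.foldl pvStepPair (q, V) ns).2 := by
  induction ns with
  | nil => intro q V x hx; left; simpa using hx
  | cons w ws ih =>
    intro q V x hx
    by_cases hw : w ∈ V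
    · rw [List.foldl, pvStepPair_mem hw] at hx ⊢
      exact ih q V x hx
    · rw [List.foldl, pvStepPair_not_mem hw] at hx ⊢
      rcases ih (q ++ [w]) (V ++ [w]) x hx with h | h
      · rcases List.mem_append.mp h with h | h
        · exact Or.inl h
        · simp at h; subst h
          exact Or.inr (pvFoldA_subV ws (q ++ [x]) (V ++ [x]) x (by simp))
      · exact Or.inr h

theorem pvFoldA_newInQ (ns : List String) : ∀ (q V : List String), ∀ x,
    x ∈ (List.foldl pvStepPair (q, V) ns).2 →
    x ∈ (List.foldl pvStepPair (q, V) ns).1 ∨ x ∈ V := by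
  induction ns with
  | nil => intro q V x hx; right; simpa using hx
  | cons w ws ih =>
    intro q V x hx
    by_cases hw : w ∈ V
    · rw [List.foldl, pvStepPair_mem hw] at hx ⊢
      exact ih q V x hx
    · rw [List.foldl, pvStepPair_not_mem hw] at hx ⊢
      rcases ih (q ++ [w]) (V ++ [w]) x hx with h | h
      · exact Or.inl h
      · rcases List.mem_append.mp h with h | h
        · exact Or.inr h
        · simp at h; subst h
          exact Or.inl (pvFoldA_subQ ws (q ++ [x]) (V ++ [x]) x (by simp))

theorem pvFoldA_nodup (ns : List String) : ∀ (q V : List String), V.Nodup →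
    (List.foldl pvStepPair (q, V) ns).2.Nodup := by
  induction ns with
  | nil => intro q V h; simpa using h
  | cons w ws ih =>
    intro q V h
    by_cases hw : w ∈ V
    · rw [List.foldl, pvStepPair_mem hw]; exact ih q V h
    · rw [List.foldl, pvStepPair_not_mem hw]
      rw [← PySem.Set.add_of_not_mem hw]
      exact ih (q ++ [w]) (PySem.Set.add V w) (PySem.Set.nodup_add V w h)

theorem pvFoldA_len (ns : List String) : ∀ (q V : List String),
    (List.foldl pvStepPair (q, V) ns).1.length + V.length =
    q.length + (List.foldl pvStepPair (q, V) ns).2.length := by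
  induction ns with
  | nil => intro q V; simp
  | cons w ws ih =>
    intro q V
    by_cases hw : w ∈ V
    · rw [List.foldl, pvStepPair_mem hw]; exact ih q V
    · rw [List.foldl, pvStepPair_not_mem hw]
      have := ih (q ++ [w]) (V ++ [w])
      simp only [List.length_append, List.length_cons, List.length_nil] at this ⊢
      omega

theorem pvFoldA_lenV (ns : List String) : ∀ (q V : List String),
    V.length ≤ (List.foldl pvStepPair (q, V) ns).2.length := by
  induction ns with
  | nil => intro q V; simp
  | cons w ws ih =>
    intro q V
    by_cases hw : w ∈ V
    · rw [List.foldl, pvStepPair_mem hw]; exact ih q V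
    · rw [List.foldl, pvStepPair_not_mem hw]
      have := ih (q ++ [w]) (V ++ [w])
      simp only [List.length_append, List.length_cons, List.length_nil] at this
      omega

theorem pvNodup_length_le (l₁ l₂ : List String) (h : l₁.Nodup) (hs : ∀ x ∈ l₁, x ∈ l₂) :
    l₁.length ≤ l₂.length := by
  calc l₁.length = l₁.toFinset.card := (List.toFinset_card_of_nodup h).symm
    _ ≤ l₂.toFinset.card := Finset.card_le_card (fun x hx => by
        simp only [List.mem_toFinset] at hx ⊢; exact hs x hx)
    _ ≤ l₂.length := l₂.toFinset_card_le

theorem bfsAux_iff (word1 word2 : String) (adjacency : List (String × List String)) :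
    ∀ (fuel : Nat) (q V : List String),
    word1 ∈ V →
    (∀ x ∈ q, x ∈ V) →
    (∀ v ∈ V, pvReach adjacency word1 v) →
    (∀ v ∈ V, v ∈ q ∨ ∀ u ∈ pvNb adjacency v, u ∈ V) →
    (word2 ∈ V → word2 ∈ q) →
    V.Nodup →
    (∀ x ∈ V, x ∈ pvUniv word1 adjacency) →
    2 * ((pvUniv word1 adjacency).length - V.length) + q.length ≤ fuel →
    (bfsAux word2 adjacency fuel q V = true ↔ pvReach adjacency word1 word2) := by
  intro fuel
  induction fuel with
  | zero =>
    intro q V h1 h2 h3 h4 h5 h6 h7 hfuel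
    have hq : q = [] := by
      cases q with
      | nil => rfl
      | cons a as => simp [List.length_cons] at hfuel
    subst hq
    simp only [bfsAux, Bool.false_eq_true, false_iff]
    intro hr
    have : word2 ∈ V := pvReach_subset adjacency word1 V h1
      (fun v hv => (h4 v hv).resolve_left (by simp)) word2 hr
    simpa using h5 this
  | succ fuel ih =>
    intro q V h1 h2 h3 h4 h5 h6 h7 hfuel
    cases q with
    | nil =>
      simp only [bfsAux, Bool.false_eq_true, false_iff]
      intro hr
      have : word2 ∈ V := pvReach_subset adjacency word1 V h1
        (fun v hv => (h4 v hv).resolve_left (by simp)) word2 hr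
      simpa using h5 this
    | cons word rest =>
      by_cases heq : word2 = word
      · subst heq
        simp only [bfsAux, beq_self_eq_true, if_true, true_iff]
        exact h3 word2 (h2 word2 (List.mem_cons_self ..))
      · have hbeq : (word2 == word) = false := beq_eq_false_iff_ne.mpr heq
        cases hadj : pvAdjGet adjacency word with
        | none =>
          simp only [bfsAux, hbeq, Bool.false_eq_true, reduceIte, hadj]
          have hnb : pvNb adjacency word = [] := by simp [pvNb, hadj]
          apply ih rest V h1 (fun x hx => h2 x (List.mem_cons_of_mem _ hx)) h3
          · intro v hv
            rcases h4 v hv with h | h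
            · rcases List.mem_cons.mp h with h | h
              · subst h; right; rw [hnb]; intro u hu; simp at hu
              · exact Or.inl h
            · exact Or.inr h
          · intro hw2
            rcases List.mem_cons.mp (h5 hw2) with h | h
            · exact absurd h heq
            · exact h
          · exact h6
          · exact h7
          · simp only [List.length_cons] at hfuel; omega
        | some ns =>
          simp only [bfsAux, hbeq, Bool.false_eq_true, reduceIte, hadj]
          have hnb : pvNb adjacency word = ns := by simp [pvNb, hadj]
          set r := List.foldl pvStepPair (rest, V) ns with hr
          have hwordV : word ∈ V := h2 word (List.mem_cons_self ..)
          have hVsub : ∀ x ∈ V, x ∈ r.2 := pvFoldA_subV ns rest V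
          have hNsub : ∀ x ∈ ns, x ∈ r.2 := pvFoldA_subNs ns rest V
          have hRest : ∀ x ∈ rest, x ∈ r.1 := pvFoldA_subQ ns rest V
          apply ih r.1 r.2 (hVsub word1 h1)
          · intro x hx
            rcases pvFoldA_memQ ns rest V x hx with h | h
            · exact hVsub x (h2 x (List.mem_cons_of_mem _ h))
            · exact h
          · intro v hv
            rcases pvFoldA_memV ns rest V v hv with h | h
            · exact h3 v h
            · exact pvReach.step (h3 word hwordV) (hnb ▸ h)
          · intro v hv
            rcases pvFoldA_newInQ ns rest V v hv with h | h
            · exact Or.inl h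
            · rcases h4 v h with h' | h'
              · rcases List.mem_cons.mp h' with h' | h'
                · subst h'; right; rw [hnb]; exact hNsub
                · exact Or.inl (hRest v h')
              · exact Or.inr (fun u hu => hVsub u (h' u hu))
          · intro hw2
            rcases pvFoldA_newInQ ns rest V word2 hw2 with h | h
            · exact h
            · rcases List.mem_cons.mp (h5 h) with h' | h'
              · exact absurd h' heq
              · exact hRest word2 h'
          · exact pvFoldA_nodup ns rest V h6
          · intro x hx
            rcases pvFoldA_memV ns rest V x hx with h | h
            · exact h7 x h
            · exact pvNb_subset_univ adjacency word1 word x (hnb ▸ h)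
          · have hlen : r.1.length + V.length = rest.length + r.2.length :=
              pvFoldA_len ns rest V
            have hlenV : V.length ≤ r.2.length := pvFoldA_lenV ns rest V
            have hVle : V.length ≤ (pvUniv word1 adjacency).length :=
              pvNodup_length_le V _ h6 h7
            have hV'le : r.2.length ≤ (pvUniv word1 adjacency).length :=
              pvNodup_length_le r.2 _ (pvFoldA_nodup ns rest V h6)
                (fun x hx => by
                  rcases pvFoldA_memV ns rest V x hx with h | h
                  · exact h7 x h
                  · exact pvNb_subset_univ adjacency word1 word x (hnb ▸ h))
            simp only [List.length_cons] at hfuel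
            omega

theorem bfs_iff (word1 word2 : String) (adjacency : List (String × List String)) :
    bfs word1 word2 adjacency = true ↔ pvReach adjacency word1 word2 := by
  have hinit : PySem.Set.add PySem.Set.empty word1 = [word1] := by
    simp [PySem.Set.empty]
  unfold bfs
  rw [hinit]
  apply bfsAux_iff word1 word2 adjacency _ [word1] [word1]
  · simp
  · simp
  · intro v hv; simp at hv; subst hv; exact pvReach.base
  · intro v hv; exact Or.inl hv
  · intro h; simpa using h
  · simp
  · intro x hx; simp at hx; subst hx; simp [pvUniv]
  · simp only [List.length_cons, List.length_nil, pvUniv]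
    omega

-- ===== B side =====

theorem pvFoldB_prefix (ns : List String) : ∀ (acc : PySem.Set String),
    ∃ e, List.foldl (fun a v => PySem.Set.add a v) acc ns = acc ++ e := by
  induction ns with
  | nil => intro acc; exact ⟨[], by simp⟩
  | cons w ws ih =>
    intro acc
    by_cases hw : w ∈ acc
    · rw [List.foldl, PySem.Set.add_of_mem hw]; exact ih acc
    · rw [List.foldl, PySem.Set.add_of_not_mem hw]
      obtain ⟨e, he⟩ := ih (acc ++ [w])
      exact ⟨w :: e, by simp [he]⟩

theorem pvFoldB_subNs (ns : List String) : ∀ (acc : PySem.Set String), ∀ x ∈ ns,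
    x ∈ List.foldl (fun a v => PySem.Set.add a v) acc ns := by
  induction ns with
  | nil => intro acc x hx; simp at hx
  | cons w ws ih =>
    intro acc x hx
    rcases List.mem_cons.mp hx with hx | hx
    · subst hx
      obtain ⟨e, he⟩ := pvFoldB_prefix ws (PySem.Set.add acc x)
      rw [List.foldl, he]
      exact List.mem_append_left _ (by rw [PySem.Set.mem_add]; right; rfl)
    · exact ih (PySem.Set.add acc w) x hx

theorem pvFoldB_mem (ns : List String) : ∀ (acc : PySem.Set String), ∀ x,
    x ∈ List.foldl (fun a v => PySem.Set.add a v) acc ns → x ∈ acc ∨ x ∈ ns := by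
  induction ns with
  | nil => intro acc x hx; left; simpa using hx
  | cons w ws ih =>
    intro acc x hx
    rcases ih (PySem.Set.add acc w) x hx with h | h
    · rcases (PySem.Set.mem_add _ _ _).mp h with h | h
      · exact Or.inl h
      · subst h; exact Or.inr (List.mem_cons_self ..)
    · exact Or.inr (List.mem_cons_of_mem _ h)

theorem pvFoldB_nodup (ns : List String) : ∀ (acc : PySem.Set String), acc.Nodup →
    (List.foldl (fun a v => PySem.Set.add a v) acc ns).Nodup := by
  induction ns with
  | nil => intro acc h; simpa using h
  | cons w ws ih => intro acc h; exact ih (PySem.Set.add acc w) (PySem.Set.nodup_add acc w h)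

theorem pvPassStep_prefix (adjacency : List (String × List String)) (acc : PySem.Set String)
    (w : String) : ∃ e, pvPassStep adjacency acc w = acc ++ e := by
  unfold pvPassStep
  cases pvAdjGet adjacency w with
  | none => exact ⟨[], by simp⟩
  | some ns => exact pvFoldB_prefix ns acc

theorem pvPassStep_nb (adjacency : List (String × List String)) (acc : PySem.Set String)
    (w : String) : ∀ u ∈ pvNb adjacency w, u ∈ pvPassStep adjacency acc w := by
  intro u hu
  unfold pvNb at hu
  unfold pvPassStep
  cases hadj : pvAdjGet adjacency w with
  | none => rw [hadj] at hu; simp at hu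
  | some ns =>
    rw [hadj] at hu
    simp only [Option.getD_some] at hu
    exact pvFoldB_subNs ns acc u hu

theorem pvPassStep_mem (adjacency : List (String × List String)) (acc : PySem.Set String)
    (w : String) : ∀ x, x ∈ pvPassStep adjacency acc w → x ∈ acc ∨ x ∈ pvNb adjacency w := by
  intro x hx
  unfold pvPassStep at hx
  unfold pvNb
  cases hadj : pvAdjGet adjacency w with
  | none => rw [hadj] at hx; exact Or.inl hx
  | some ns =>
    rw [hadj] at hx
    simpa using pvFoldB_mem ns acc x hx

theorem pvPassStep_nodup (adjacency : List (String × List String)) (acc : PySem.Set String)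
    (w : String) (h : acc.Nodup) : (pvPassStep adjacency acc w).Nodup := by
  unfold pvPassStep
  cases pvAdjGet adjacency w with
  | none => exact h
  | some ns => exact pvFoldB_nodup ns acc h

theorem pvPassFold_prefix (adjacency : List (String × List String)) (S : List String) :
    ∀ (acc : PySem.Set String), ∃ e, List.foldl (pvPassStep adjacency) acc S = acc ++ e := by
  induction S with
  | nil => intro acc; exact ⟨[], by simp⟩
  | cons w ws ih =>
    intro acc
    obtain ⟨e1, he1⟩ := pvPassStep_prefix adjacency acc w
    obtain ⟨e2, he2⟩ := ih (pvPassStep adjacency acc w)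
    exact ⟨e1 ++ e2, by rw [List.foldl, he2, he1, List.append_assoc]⟩

theorem pvPassFold_nb (adjacency : List (String × List String)) (S : List String) :
    ∀ (acc : PySem.Set String), ∀ w ∈ S, ∀ u ∈ pvNb adjacency w,
    u ∈ List.foldl (pvPassStep adjacency) acc S := by
  induction S with
  | nil => intro acc w hw; simp at hw
  | cons w' ws ih =>
    intro acc w hw u hu
    rcases List.mem_cons.mp hw with hw | hw
    · subst hw
      obtain ⟨e, he⟩ := pvPassFold_prefix adjacency ws (pvPassStep adjacency acc w)
      rw [List.foldl, he]
      exact List.mem_append_left _ (pvPassStep_nb adjacency acc w u hu)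
    · exact ih (pvPassStep adjacency acc w') w hw u hu

theorem pvPassFold_mem (adjacency : List (String × List String)) (S : List String) :
    ∀ (acc : PySem.Set String), ∀ x, x ∈ List.foldl (pvPassStep adjacency) acc S →
    x ∈ acc ∨ ∃ w ∈ S, x ∈ pvNb adjacency w := by
  induction S with
  | nil => intro acc x hx; left; simpa using hx
  | cons w ws ih =>
    intro acc x hx
    rcases ih (pvPassStep adjacency acc w) x hx with h | h
    · rcases pvPassStep_mem adjacency acc w x h with h | h
      · exact Or.inl h
      · exact Or.inr ⟨w, List.mem_cons_self .., h⟩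
    · obtain ⟨w', hw', h⟩ := h
      exact Or.inr ⟨w', List.mem_cons_of_mem _ hw', h⟩

theorem pvPassFold_nodup (adjacency : List (String × List String)) (S : List String) :
    ∀ (acc : PySem.Set String), acc.Nodup → (List.foldl (pvPassStep adjacency) acc S).Nodup := by
  induction S with
  | nil => intro acc h; simpa using h
  | cons w ws ih =>
    intro acc h
    exact ih (pvPassStep adjacency acc w) (pvPassStep_nodup adjacency acc w h)

theorem pvPass_prefix (adjacency : List (String × List String)) (R : PySem.Set String) :
    ∃ e, pvPass adjacency R = R ++ e :=
  pvPassFold_prefix adjacency R R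

theorem pvPass_eq_of_len (adjacency : List (String × List String)) (R : PySem.Set String)
    (h : (pvPass adjacency R).length = R.length) : pvPass adjacency R = R := by
  obtain ⟨e, he⟩ := pvPass_prefix adjacency R
  have : e = [] := by
    rw [he, List.length_append] at h
    exact List.eq_nil_of_length_eq_zero (by omega)
  simpa [this] using he

theorem pvPass_closed (adjacency : List (String × List String)) (R : PySem.Set String)
    (h : pvPass adjacency R = R) : ∀ w ∈ R, ∀ u ∈ pvNb adjacency w, u ∈ R := by
  intro w hw u hu
  rw [← h]
  exact pvPassFold_nb adjacency R R w hw u hu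

-- the combined invariant carried through B's loop
def pvInv (word1 : String) (adjacency : List (String × List String)) (R : PySem.Set String) :
    Prop :=
  word1 ∈ R ∧ (∀ v ∈ R, pvReach adjacency word1 v) ∧ R.Nodup ∧
    (∀ x ∈ R, x ∈ pvUniv word1 adjacency)

theorem pvPass_inv (word1 : String) (adjacency : List (String × List String))
    (R : PySem.Set String) (h : pvInv word1 adjacency R) :
    pvInv word1 adjacency (pvPass adjacency R) := by
  obtain ⟨h1, h2, h3, h4⟩ := h
  obtain ⟨e, he⟩ := pvPass_prefix adjacency R
  refine ⟨by rw [he]; exact List.mem_append_left _ h1, ?_, pvPassFold_nodup adjacency R R h3, ?_⟩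
  · intro v hv
    rcases pvPassFold_mem adjacency R R v hv with h | ⟨w, hw, h⟩
    · exact h2 v h
    · exact pvReach.step (h2 w hw) h
  · intro x hx
    rcases pvPassFold_mem adjacency R R x hx with h | ⟨w, hw, h⟩
    · exact h4 x h
    · exact pvNb_subset_univ adjacency word1 w x h

theorem pvLoop_inv (word1 : String) (adjacency : List (String × List String)) :
    ∀ (n : Nat) (R : PySem.Set String), pvInv word1 adjacency R →
    pvInv word1 adjacency (pvLoop adjacency n R) := by
  intro n
  induction n with
  | zero => intro R h; exact h
  | succ n ih =>
    intro R h
    simp only [pvLoop]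
    split
    · exact pvPass_inv word1 adjacency R h
    · exact ih (pvPass adjacency R) (pvPass_inv word1 adjacency R h)

theorem pvLoop_fix (word1 : String) (adjacency : List (String × List String)) :
    ∀ (n : Nat) (R : PySem.Set String), R.Nodup → (∀ x ∈ R, x ∈ pvUniv word1 adjacency) →
    (pvUniv word1 adjacency).length + 1 ≤ n + R.length →
    pvPass adjacency (pvLoop adjacency n R) = pvLoop adjacency n R := by
  intro n
  induction n with
  | zero =>
    intro R hnd hsub hlen
    have := pvNodup_length_le R _ hnd hsub
    omega
  | succ n ih =>
    intro R hnd hsub hlen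
    simp only [pvLoop]
    split
    · next hl =>
      rw [pvPass_eq_of_len adjacency R hl]
      exact pvPass_eq_of_len adjacency R hl
    · next hl =>
      obtain ⟨e, he⟩ := pvPass_prefix adjacency R
      have hgrow : R.length + 1 ≤ (pvPass adjacency R).length := by
        rw [he, List.length_append]
        rcases e with _ | ⟨a, e⟩
        · exact absurd (by simp [he]) hl
        · simp
      apply ih (pvPass adjacency R)
      · exact pvPassFold_nodup adjacency R R hnd
      · intro x hx
        rcases pvPassFold_mem adjacency R R x hx with h | ⟨w, hw, h⟩
        · exact hsub x h
        · exact pvNb_subset_univ adjacency word1 w x h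
      · omega

theorem pvRounds_eq_univ_len (word1 : String) (adjacency : List (String × List String)) :
    1 + (adjacency.map (fun p => p.2.length)).sum = (pvUniv word1 adjacency).length := by
  simp only [pvUniv, List.length_cons, List.length_flatMap]
  omega

theorem bfs_alt_iff (word1 word2 : String) (adjacency : List (String × List String)) :
    bfs_alt word1 word2 adjacency = true ↔ pvReach adjacency word1 word2 := by
  have hinit : PySem.Set.add PySem.Set.empty word1 = [word1] := by
    simp [PySem.Set.empty]
  unfold bfs_alt
  rw [hinit]
  set N := 1 + (adjacency.map (fun p => p.2.length)).sum with hN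
  set L := pvLoop adjacency N [word1] with hL
  have hNU : N = (pvUniv word1 adjacency).length := pvRounds_eq_univ_len word1 adjacency
  have hinv : pvInv word1 adjacency L := by
    apply pvLoop_inv
    exact ⟨by simp, fun v hv => by simp at hv; subst hv; exact pvReach.base, by simp,
      fun x hx => by simp at hx; subst hx; simp [pvUniv]⟩
  have hfix : pvPass adjacency L = L := by
    apply pvLoop_fix word1 adjacency N [word1] (by simp)
    · intro x hx; simp at hx; subst hx; simp [pvUniv]
    · simp [hNU]
  obtain ⟨h1, h2, h3, h4⟩ := hinv
  have hc : PySem.Set.contains L word2 = true ↔ word2 ∈ L := by simp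
  rw [hc]
  constructor
  · intro h; exact h2 word2 h
  · intro h
    exact pvReach_subset adjacency word1 L h1 (pvPass_closed adjacency L hfix) word2 h

-- ===== VERDICT (by name: the statement is the Claim_ definition above) =====
theorem bfs_spec : Claim_equal_bfs := by
  intro word1 word2 adjacency _
  unfold Spec_bfs
  exact Bool.eq_iff_iff.mpr
    ((bfs_iff word1 word2 adjacency).trans (bfs_alt_iff word1 word2 adjacency).symm)
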